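-- pv_equiv track=rewrite | github.com/bradb423/bradley-aoc | advent_of_code/year_2015/problem3/problem3.py | reading_instructions
-- ===== SOURCE A (Python) =====
-- def reading_instructions(instructions):
--     santas_position = (
--         "0,0"  # easiest way to use coordinates here, also, I can make a set out of it
--     )
--     position_list = [santas_position]
--     santas_position_coord = [0, 0]  # easiest form to manipulate
--     for instruction in instructions:
--         if instruction == "^":
--             santas_position_coord[1] += 1
--         elif instruction == "v":
--             santas_position_coord[1] += -1
--         elif instruction == ">":
--             santas_position_coord[0] += 1
--         elif instruction == "<":
--             santas_position_coord[0] += -1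
--         position_list.append(
--             str(santas_position_coord[0]) + "," + str(santas_position_coord[1])
--         )
--     return position_list  # please work...
-- ===== SOURCE B (Python) =====
-- _DELTAS = {"^": (0, 1), "v": (0, -1), ">": (1, 0), "<": (-1, 0)}
--
--
-- def reading_instructions(instructions):
--     # Divide and conquer: solve(s) is the list of positions visited starting
--     # from (0,0); halves are solved independently and the right half's
--     # positions are shifted by the left half's final displacement.
--     def solve(s):
--         if not s:
--             return [(0, 0)]
--         if len(s) == 1:
--             return [(0, 0), _DELTAS.get(s[0], (0, 0))]
--         mid = len(s) // 2
--         left = solve(s[:mid])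
--         right = solve(s[mid:])
--         ox, oy = left[-1]
--         return left[:-1] + [(ox + x, oy + y) for x, y in right]
--
--     return [f"{x},{y}" for x, y in solve(instructions)]
-- ===== Notes on version B (the rewrite author's own statement) =====
-- stated objective: alternative
-- what changed: Replaced the single left-to-right mutating loop by a divide-and-conquer: each half of the string is solved independently from (0,0) and the right half's positions are shifted by the left half's final displacement, then everything is formatted at the end.
import Mathlib
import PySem

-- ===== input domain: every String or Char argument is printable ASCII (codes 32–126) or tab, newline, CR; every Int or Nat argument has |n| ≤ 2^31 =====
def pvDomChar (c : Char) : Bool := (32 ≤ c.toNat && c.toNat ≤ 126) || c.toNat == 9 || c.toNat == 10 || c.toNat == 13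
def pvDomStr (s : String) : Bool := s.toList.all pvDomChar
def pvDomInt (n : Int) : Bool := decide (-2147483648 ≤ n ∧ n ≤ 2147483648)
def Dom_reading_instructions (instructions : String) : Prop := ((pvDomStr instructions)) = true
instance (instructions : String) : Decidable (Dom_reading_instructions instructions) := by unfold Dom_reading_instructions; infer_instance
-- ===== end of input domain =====

-- B replaces A's single mutating loop by a divide-and-conquer over halves of the string
-- (right half's positions shifted by the left half's final displacement): a genuinely
-- different algorithm of similar cost, not claimed faster.

-- ===== PORT A =====
-- loop body; state = (santas_position_coord as an Int pair, position_list)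
def riStepA (st : (Int × Int) × List String) (c : Char) : (Int × Int) × List String :=
  let coord :=
    if c = '^' then (st.1.1, st.1.2 + 1)
    else if c = 'v' then (st.1.1, st.1.2 + (-1))
    else if c = '>' then (st.1.1 + 1, st.1.2)
    else if c = '<' then (st.1.1 + (-1), st.1.2)
    else st.1
  (coord, st.2 ++ [PySem.Int.toStr coord.1 ++ "," ++ PySem.Int.toStr coord.2])

def reading_instructions (instructions : String) : List String :=
  (instructions.toList.foldl riStepA ((0, 0), ["0,0"])).2

-- ===== PORT B =====
def riDeltas : PySem.Dict Char (Int × Int) :=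
  PySem.Dict.ofList [('^', (0, 1)), ('v', (0, -1)), ('>', (1, 0)), ('<', (-1, 0))]

def riFmt (p : Int × Int) : String := PySem.Int.toStr p.1 ++ "," ++ PySem.Int.toStr p.2

-- Source B's inner 'solve': divide and conquer on the char list
def riSolve : List Char → List (Int × Int)
  | [] => [(0, 0)]
  | [c] => [(0, 0), riDeltas.getD c (0, 0)]
  | c₁ :: c₂ :: rest =>
    let cs := c₁ :: c₂ :: rest
    let mid := cs.length / 2
    let left := riSolve (cs.take mid)
    let right := riSolve (cs.drop mid)
    let o := left.getLast!
    left.dropLast ++ right.map (fun p => (o.1 + p.1, o.2 + p.2))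
termination_by cs => cs.length
decreasing_by
  · simp [List.length_take]; omega
  · simp; omega

def reading_instructions_alt (instructions : String) : List String :=
  (riSolve instructions.toList).map riFmt

-- ===== PRECONDITION & SPEC =====
def Spec_reading_instructions (instructions : String) (out : List String) : Prop := out = reading_instructions_alt instructions
instance (instructions : String) (out : List String) : Decidable (Spec_reading_instructions instructions out) := by unfold Spec_reading_instructions; infer_instance

-- ===== CLAIM (what is proved, stated in full; the proofs are below) =====
def Claim_equal_reading_instructions : Prop := ∀ (instructions : String), Dom_reading_instructions instructions → Spec_reading_instructions instructions (reading_instructions instructions)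

-- ===== LEMMAS AND PROOFS =====

-- the list of all visited positions, as a left-to-right scan (the invariant of A's loop)
def riScan : (Int × Int) → List Char → List (Int × Int)
  | p, [] => [p]
  | p, c :: cs =>
      let d := riDeltas.getD c (0, 0)
      p :: riScan (p.1 + d.1, p.2 + d.2) cs

theorem riDeltas_getD (c : Char) :
    riDeltas.getD c (0, 0) =
      if c = '^' then (0, 1) else if c = 'v' then (0, -1)
      else if c = '>' then (1, 0) else if c = '<' then (-1, 0) else (0, 0) := by
  split_ifs with h1 h2 h3 h4
  · subst h1; decide
  · subst h2; decide
  · subst h3; decide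
  · subst h4; decide
  · have e1 : ('^' == c) = false := by simp [Ne.symm h1]
    have e2 : ('v' == c) = false := by simp [Ne.symm h2]
    have e3 : ('>' == c) = false := by simp [Ne.symm h3]
    have e4 : ('<' == c) = false := by simp [Ne.symm h4]
    simp [riDeltas, PySem.Dict.getD, PySem.Dict.get?, PySem.Dict.ofList, PySem.Dict.update,
      PySem.Dict.insert, PySem.Dict.empty, List.find?, e1, e2, e3, e4]

theorem riStepA_eq (st : (Int × Int) × List String) (c : Char) :
    riStepA st c =
      ((st.1.1 + (riDeltas.getD c (0, 0)).1, st.1.2 + (riDeltas.getD c (0, 0)).2),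
       st.2 ++ [riFmt (st.1.1 + (riDeltas.getD c (0, 0)).1, st.1.2 + (riDeltas.getD c (0, 0)).2)]) := by
  rw [riDeltas_getD]
  unfold riStepA riFmt
  obtain ⟨⟨x, y⟩, acc⟩ := st
  split_ifs <;> simp

theorem riScan_head_tail (p : Int × Int) (cs : List Char) :
    riScan p cs = p :: (riScan p cs).tail := by
  cases cs <;> simp [riScan]

theorem riScan_ne_nil (p : Int × Int) (cs : List Char) : riScan p cs ≠ [] := by
  cases cs <;> simp [riScan]

theorem foldA_eq (cs : List Char) : ∀ (p : Int × Int) (acc : List String),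
    (cs.foldl riStepA (p, acc)).2 = acc ++ ((riScan p cs).map riFmt).tail := by
  induction cs with
  | nil => intro p acc; simp [riScan]
  | cons c cs ih =>
    intro p acc
    rw [List.foldl_cons, riStepA_eq, ih]
    rw [show riScan p (c :: cs) =
        p :: riScan (p.1 + (riDeltas.getD c (0, 0)).1, p.2 + (riDeltas.getD c (0, 0)).2) cs
      from rfl]
    rw [riScan_head_tail (p.1 + (riDeltas.getD c (0, 0)).1, p.2 + (riDeltas.getD c (0, 0)).2) cs]
    simp

-- shifting the start shifts every position of the scan
theorem riScan_shift (cs : List Char) : ∀ (a p : Int × Int),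
    riScan (a.1 + p.1, a.2 + p.2) cs =
      (riScan p cs).map (fun q => (a.1 + q.1, a.2 + q.2)) := by
  induction cs with
  | nil => intro a p; simp [riScan]
  | cons c cs ih =>
    intro a p
    simp only [riScan, List.map_cons]
    congr 1
    have h : (a.1 + p.1 + (riDeltas.getD c (0, 0)).1, a.2 + p.2 + (riDeltas.getD c (0, 0)).2)
        = (a.1 + (p.1 + (riDeltas.getD c (0, 0)).1), a.2 + (p.2 + (riDeltas.getD c (0, 0)).2)) := by
      simp [add_assoc]
    rw [h]
    exact ih a (p.1 + (riDeltas.getD c (0, 0)).1, p.2 + (riDeltas.getD c (0, 0)).2)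

-- shift from the origin, stated for an arbitrary start
theorem riScan_shift0 (cs : List Char) (a : Int × Int) :
    riScan a cs = (riScan (0, 0) cs).map (fun q => (a.1 + q.1, a.2 + q.2)) := by
  have h := riScan_shift cs a (0, 0)
  simpa using h

-- last element of a cons, when the tail is nonempty
theorem riGetLast_cons (a : Int × Int) (l : List (Int × Int)) (h : l ≠ []) :
    (a :: l).getLast! = l.getLast! := by
  have h1 : l.getLast? = some (l.getLast h) := List.getLast?_eq_some_getLast h
  simp [List.getLast?_cons, h1]

-- scanning a concatenation = scan the left part, continue from its last position
theorem riScan_append (l : List Char) : ∀ (r : List Char) (p : Int × Int),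
    riScan p (l ++ r) = (riScan p l).dropLast ++ riScan ((riScan p l).getLast!) r := by
  induction l with
  | nil => intro r p; simp [riScan]
  | cons c l ih =>
    intro r p
    simp only [List.cons_append, riScan]
    rw [ih]
    have hne := riScan_ne_nil (p.1 + (riDeltas.getD c (0, 0)).1, p.2 + (riDeltas.getD c (0, 0)).2) l
    rw [riGetLast_cons p _ hne, List.dropLast_cons_of_ne_nil hne]
    simp

-- the divide-and-conquer computes exactly the scan from the origin
theorem riSolve_eq_scan (cs : List Char) : riSolve cs = riScan (0, 0) cs := by
  induction cs using riSolve.induct with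
  | case1 => simp [riSolve, riScan]
  | case2 c => simp [riSolve, riScan]
  | case3 c₁ c₂ rest cs mid ih1 ih2 =>
    subst cs mid
    rw [riSolve]
    rw [ih1, ih2]
    have happ := riScan_append ((c₁ :: c₂ :: rest).take ((c₁ :: c₂ :: rest).length / 2))
      ((c₁ :: c₂ :: rest).drop ((c₁ :: c₂ :: rest).length / 2)) (0, 0)
    rw [List.take_append_drop] at happ
    rw [happ]
    congr 1
    rw [riScan_shift0 ((c₁ :: c₂ :: rest).drop ((c₁ :: c₂ :: rest).length / 2))
      ((riScan (0, 0) ((c₁ :: c₂ :: rest).take ((c₁ :: c₂ :: rest).length / 2))).getLast!)]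

-- ===== VERDICT (by name: the statement is the Claim_ definition above) =====
theorem reading_instructions_spec : Claim_equal_reading_instructions := by
  intro instructions _
  unfold Spec_reading_instructions reading_instructions reading_instructions_alt
  rw [foldA_eq, riSolve_eq_scan]
  rw [riScan_head_tail (0, 0) instructions.toList]
  simp [riFmt]
  decide
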